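-- pv_equiv track=rewrite | github.com/martinaclemente/second-assignment | revp.py | find_reverse_palindromes
-- ===== SOURCE A (Python) =====
-- def reverse_complement(seq):
--     complement = {'A': 'T', 'C': 'G', 'G': 'C', 'T': 'A'}
--     return ''.join(complement[base] for base in reversed(seq))
--
-- def find_reverse_palindromes(dna):
--     dna = dna.replace('\n', '').replace(' ', '')
--
--     results = []
--     n = len(dna)
--
--     for length in range(4, 13):
--         for start in range(n - length + 1):
--             substring = dna[start:start + length]
--             if substring == reverse_complement(substring):
--                 results.append((start + 1, length))
--
--     results.sort()
--
--     return results
-- ===== SOURCE B (Python) =====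
-- def find_reverse_palindromes(dna):
--     dna = dna.replace('\n', '').replace(' ', '')
--     n = len(dna)
--     results = []
--     if n >= 4:
--         complement = {'A': 'T', 'C': 'G', 'G': 'C', 'T': 'A'}
--         comp = [complement[c] for c in dna]
--         # expand around every even center: positions c-1 | c
--         for c in range(1, n):
--             r = 1
--             while r <= 6 and r <= c and c + r <= n and dna[c - r] == comp[c + r - 1]:
--                 if r >= 2:
--                     results.append((c - r + 1, 2 * r))
--                 r += 1
--     results.sort()
--     return results
-- ===== Notes on version B (the rewrite author's own statement) =====
-- stated objective: faster
-- what changed: Replaces A's scan over all 9*n substrings of lengths 4..12 (each checked by building its reverse-complement string) with a single even-center expansion: the complement array is precomputed once and each of the n-1 centers is expanded outward only while characters keep matching, emitting (start,length) pairs and stopping at the first mismatch or length 12, then one final sort.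
import Mathlib
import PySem

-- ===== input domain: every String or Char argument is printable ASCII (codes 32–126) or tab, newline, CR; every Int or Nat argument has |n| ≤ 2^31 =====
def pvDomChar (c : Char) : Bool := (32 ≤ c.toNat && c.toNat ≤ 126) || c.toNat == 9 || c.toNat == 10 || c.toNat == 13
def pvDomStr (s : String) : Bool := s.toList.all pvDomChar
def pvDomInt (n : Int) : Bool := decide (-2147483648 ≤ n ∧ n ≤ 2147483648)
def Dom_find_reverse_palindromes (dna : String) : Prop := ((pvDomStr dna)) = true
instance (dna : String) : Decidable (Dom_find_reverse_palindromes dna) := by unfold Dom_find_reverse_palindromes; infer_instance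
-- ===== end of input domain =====

-- B replaces A's scan over all substrings of lengths 4..12 (each rebuilt as a reverse-complement
-- string) with a single even-center expansion over a precomputed complement array; same results.

-- ===== PORT A =====
-- complement = {'A': 'T', 'C': 'G', 'G': 'C', 'T': 'A'}
def pvComplDict : PySem.Dict Char Char :=
  PySem.Dict.ofList [('A', 'T'), ('C', 'G'), ('G', 'C'), ('T', 'A')]

-- ''.join(complement[base] for base in bases)  — none where the dict lookup raises KeyError
def pvJoinCompl : List Char → Option (List Char)
  | [] => some []
  | b :: rest =>
    match pvComplDict.get? b, pvJoinCompl rest with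
    | some c, some cs => some (c :: cs)
    | _, _ => none

-- return ''.join(complement[base] for base in reversed(seq))
def reverse_complement (seq : List Char) : Option (List Char) := pvJoinCompl seq.reverse

def find_reverse_palindromes (dna : String) : List (Int × Int) :=
  let cs := (PySem.Str.replace (PySem.Str.replace dna "\n" "") " " "").toList
  let n : Int := PySem.List.len cs
  let results : List (Int × Int) :=
    (PySem.List.pyRange 4 13 1).foldl (fun acc length =>
      (PySem.List.pyRange 0 (n - length + 1) 1).foldl (fun acc start =>
        let substring := PySem.List.slice cs (some start) (some (start + length))
        -- 'substring == reverse_complement(substring)'; the comparison is only reached when no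
        -- KeyError occurred, i.e. reverse_complement returned a value (guaranteed under Pre_)
        if reverse_complement substring = some substring then acc ++ [(start + 1, length)]
        else acc) acc) []
  PySem.List.sorted2 results Prod.fst Prod.snd

-- ===== PORT B =====
-- complement[c] as a total function; the final branch is never reached under Pre_
def pvCompl (c : Char) : Char :=
  if c = 'A' then 'T' else if c = 'C' then 'G' else if c = 'G' then 'C'
  else if c = 'T' then 'A' else c

-- the inner 'while' loop of B: expand radius r around the even center c-1|c
def pvExpand (cs comp : List Char) (n c : Nat) (r : Nat) : List (Int × Int) :=
  if h : r ≤ 6 ∧ r ≤ c ∧ c + r ≤ n ∧ cs.getD (c - r) ' ' = comp.getD (c + r - 1) ' ' then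
    (if 2 ≤ r then [((c : Int) - (r : Int) + 1, 2 * (r : Int))] else []) ++
      pvExpand cs comp n c (r + 1)
  else []
termination_by 7 - r
decreasing_by omega

def find_reverse_palindromes_alt (dna : String) : List (Int × Int) :=
  let cs := (PySem.Str.replace (PySem.Str.replace dna "\n" "") " " "").toList
  let n := cs.length
  let results : List (Int × Int) :=
    if 4 ≤ n then
      let comp := cs.map pvCompl
      (List.range' 1 (n - 1)).foldl (fun acc c => acc ++ pvExpand cs comp n c 1) []
    else []
  PySem.List.sorted2 results Prod.fst Prod.snd

-- ===== PRECONDITION & SPEC =====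
-- Pre_ excludes exactly the inputs on which A raises KeyError: a cleaned string of length ≥ 4
-- containing a character other than A/C/G/T (every character then lies in some scanned substring).
def Pre_find_reverse_palindromes (dna : String) : Prop :=
  let cs := (PySem.Str.replace (PySem.Str.replace dna "\n" "") " " "").toList
  cs.length < 4 ∨ (cs.all fun c => c == 'A' || c == 'C' || c == 'G' || c == 'T') = true
instance (dna : String) : Decidable (Pre_find_reverse_palindromes dna) := by
  unfold Pre_find_reverse_palindromes; infer_instance

def pvWitness_find_reverse_palindromes : String := "ACGT"

def Spec_find_reverse_palindromes (dna : String) (out : List (Int × Int)) : Prop := out = find_reverse_palindromes_alt dna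
instance (dna : String) (out : List (Int × Int)) : Decidable (Spec_find_reverse_palindromes dna out) := by unfold Spec_find_reverse_palindromes; infer_instance

-- ===== CLAIM (what is proved, stated in full; the proofs are below) =====
def Claim_equal_find_reverse_palindromes : Prop := ∀ (dna : String), Dom_find_reverse_palindromes dna → Pre_find_reverse_palindromes dna → Spec_find_reverse_palindromes dna (find_reverse_palindromes dna)

-- ===== LEMMAS AND PROOFS =====

-- a valid DNA base
def pvGood (c : Char) : Prop := c = 'A' ∨ c = 'C' ∨ c = 'G' ∨ c = 'T'

lemma pvGood_dict (c : Char) (h : pvGood c) : pvComplDict.get? c = some (pvCompl c) := by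
  rcases h with h | h | h | h <;> subst h <;> decide

lemma pvCompl_invol (c : Char) (h : pvGood c) : pvCompl (pvCompl c) = c := by
  rcases h with h | h | h | h <;> subst h <;> decide

lemma pvCompl_ne (c : Char) (h : pvGood c) : pvCompl c ≠ c := by
  rcases h with h | h | h | h <;> subst h <;> decide

-- under validity the KeyError branch is dead and the join is the mapped list
lemma pvJoinCompl_eq_map (u : List Char) (h : ∀ c ∈ u, pvGood c) :
    pvJoinCompl u = some (u.map pvCompl) := by
  induction u with
  | nil => rfl
  | cons b rest ih =>
    have hb := pvGood_dict b (h b (by simp))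
    have hr := ih (fun c hc => h c (by simp [hc]))
    simp [pvJoinCompl, hb, hr]

-- the pairwise match predicate at center c, radius j (1-based), over the cleaned characters
def pvPm (cs : List Char) (c j : Nat) : Prop :=
  cs.getD (c - j) ' ' = pvCompl (cs.getD (c + j - 1) ' ')

-- the A-side test on a substring, characterised pointwise
lemma pvRC_iff (u : List Char) (h : ∀ c ∈ u, pvGood c) :
    reverse_complement u = some u ↔
      ∀ i (hi : i < u.length), u[i] = pvCompl (u[u.length - 1 - i]'(by omega)) := by
  rw [reverse_complement, pvJoinCompl_eq_map u.reverse
    (fun c hc => h c (List.mem_reverse.mp hc)), Option.some_inj]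
  constructor
  · intro heq i hi
    have h1 : (u.reverse.map pvCompl)[i]'(by simpa using hi) = u[i] :=
      List.getElem_of_eq heq (by simpa using hi)
    rw [← h1]
    simp [List.getElem_reverse]
  · intro hpt
    apply List.ext_getElem (by simp)
    intro i h1 h2
    have := hpt i h2
    simp only [List.getElem_map, List.getElem_reverse]
    exact this.symm

-- odd lengths never match
lemma pvRC_odd (u : List Char) (h : ∀ c ∈ u, pvGood c) (hodd : u.length % 2 = 1) :
    reverse_complement u ≠ some u := by
  intro heq
  have hmid : u.length / 2 < u.length := by omega
  have := (pvRC_iff u h).mp heq (u.length / 2) hmid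
  have hidx : u.length - 1 - u.length / 2 = u.length / 2 := by omega
  rw [show u[u.length - 1 - u.length / 2]'(by omega) = u[u.length / 2] from by
    congr 1] at this
  · exact pvCompl_ne _ (h _ (List.getElem_mem hmid)) this.symm

-- even lengths: the A-side test on cs[s : s+2r] is the radius-wise match at center s+r
lemma pvRC_even (cs : List Char) (h : ∀ c ∈ cs, pvGood c) (s r : Nat) (hr : 1 ≤ r)
    (hle : s + 2 * r ≤ cs.length) :
    reverse_complement ((cs.drop s).take (2 * r)) = some ((cs.drop s).take (2 * r)) ↔
      ∀ j, 1 ≤ j → j ≤ r → pvPm cs (s + r) j := by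
  set u := (cs.drop s).take (2 * r) with hu_def
  have hlen : u.length = 2 * r := by
    simp only [hu_def, List.length_take, List.length_drop]
    omega
  have hu : ∀ i (hi : i < u.length), u[i] = cs.getD (s + i) ' ' := by
    intro i hi
    rw [List.getD_eq_getElem _ _ (by omega)]
    simp only [hu_def, List.getElem_take, List.getElem_drop]
  have hgood : ∀ idx, idx < cs.length → pvGood (cs.getD idx ' ') := by
    intro idx hidx
    rw [List.getD_eq_getElem _ _ hidx]
    exact h _ (List.getElem_mem hidx)
  have hvalid : ∀ c' ∈ u, pvGood c' := by
    intro c' hc'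
    exact h c' (List.mem_of_mem_drop (List.mem_of_mem_take hc'))
  rw [pvRC_iff u hvalid]
  constructor
  · intro hA j hj1 hjr
    have h1 := hA (r - j) (by omega)
    rw [hu (r - j) (by omega), hu (u.length - 1 - (r - j)) (by omega)] at h1
    unfold pvPm
    have e1 : s + r - j = s + (r - j) := by omega
    have e2 : s + r + j - 1 = s + (u.length - 1 - (r - j)) := by omega
    rw [e1, e2]
    exact h1
  · intro hB i hi
    rw [hu i hi, hu (u.length - 1 - i) (by omega)]
    by_cases hir : i < r
    · have hp := hB (r - i) (by omega) (by omega)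
      unfold pvPm at hp
      have e1 : s + r - (r - i) = s + i := by omega
      have e2 : s + r + (r - i) - 1 = s + (u.length - 1 - i) := by omega
      rw [e1, e2] at hp
      exact hp
    · have hp := hB (i - r + 1) (by omega) (by omega)
      unfold pvPm at hp
      have e1 : s + r - (i - r + 1) = s + (u.length - 1 - i) := by omega
      have e2 : s + r + (i - r + 1) - 1 = s + i := by omega
      rw [e1, e2] at hp
      have hg : pvGood (cs.getD (s + i) ' ') := hgood _ (by omega)
      rw [hp, pvCompl_invol _ hg]

-- membership in B's expansion
lemma pvGetD_map_compl (cs : List Char) (i : Nat) :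
    (cs.map pvCompl).getD i ' ' = pvCompl (cs.getD i ' ') := by
  by_cases h : i < cs.length
  · rw [List.getD_eq_getElem _ _ (by simpa using h), List.getD_eq_getElem _ _ h, List.getElem_map]
  · rw [List.getD_eq_default _ _ (by simpa using h), List.getD_eq_default _ _ (by omega)]
    rfl

lemma pvExpand_mem (cs : List Char) (n c r : Nat) (hn : n = cs.length) (p : Int × Int) :
    p ∈ pvExpand cs (cs.map pvCompl) n c r ↔
      ∃ ρ : Nat, r ≤ ρ ∧ 2 ≤ ρ ∧ ρ ≤ 6 ∧ ρ ≤ c ∧ c + ρ ≤ n ∧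
        (∀ j, r ≤ j → j ≤ ρ → pvPm cs c j) ∧ p = ((c : Int) - (ρ : Int) + 1, 2 * (ρ : Int)) := by
  have main : ∀ k r, 7 - r ≤ k →
      (p ∈ pvExpand cs (cs.map pvCompl) n c r ↔
        ∃ ρ : Nat, r ≤ ρ ∧ 2 ≤ ρ ∧ ρ ≤ 6 ∧ ρ ≤ c ∧ c + ρ ≤ n ∧
          (∀ j, r ≤ j → j ≤ ρ → pvPm cs c j) ∧
          p = ((c : Int) - (ρ : Int) + 1, 2 * (ρ : Int))) := by
    intro k
    induction k with
    | zero =>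
      intro r hr
      rw [pvExpand]
      rw [dif_neg (by omega)]
      simp only [List.not_mem_nil, false_iff]
      rintro ⟨ρ, h1, _, h3, _⟩
      omega
    | succ k ih =>
      intro r hr
      rw [pvExpand]
      by_cases hg : r ≤ 6 ∧ r ≤ c ∧ c + r ≤ n ∧
          cs.getD (c - r) ' ' = (cs.map pvCompl).getD (c + r - 1) ' '
      · have hpm : pvPm cs c r := by
          have := hg.2.2.2
          rwa [pvGetD_map_compl] at this
        rw [dif_pos hg, List.mem_append, ih (r + 1) (by omega)]
        constructor
        · rintro (hemit | ⟨ρ, hρ1, hρ2, hρ3, hρ4, hρ5, hρ6, hρ7⟩)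
          · by_cases h2r : 2 ≤ r
            · refine ⟨r, le_refl r, h2r, hg.1, hg.2.1, hg.2.2.1, ?_, ?_⟩
              · intro j hj1 hj2
                have : j = r := by omega
                subst this; exact hpm
              · simpa [h2r] using hemit
            · simp [h2r] at hemit
          · refine ⟨ρ, by omega, hρ2, hρ3, hρ4, hρ5, ?_, hρ7⟩
            intro j hj1 hj2
            by_cases hjr : j = r
            · subst hjr; exact hpm
            · exact hρ6 j (by omega) hj2
        · rintro ⟨ρ, hρ1, hρ2, hρ3, hρ4, hρ5, hρ6, hρ7⟩
          by_cases hρr : ρ = r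
          · subst hρr
            left
            simp [hρ2, hρ7]
          · right
            exact ⟨ρ, by omega, hρ2, hρ3, hρ4, hρ5, fun j hj1 hj2 => hρ6 j (by omega) hj2, hρ7⟩
      · rw [dif_neg hg]
        simp only [List.not_mem_nil, false_iff]
        rintro ⟨ρ, h1, h2, h3, h4, h5, h6, h7⟩
        exact hg ⟨by omega, by omega, by omega, by
          rw [pvGetD_map_compl]; exact h6 r (le_refl r) (by omega)⟩
  exact main (7 - r) r (le_refl _)

-- elements of the expansion determine ρ (second component) strictly increasing: Nodup
lemma pvExpand_nodup (cs : List Char) (n c r : Nat) (hn : n = cs.length) :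
    (pvExpand cs (cs.map pvCompl) n c r).Nodup := by
  have main : ∀ k r, 7 - r ≤ k → (pvExpand cs (cs.map pvCompl) n c r).Nodup := by
    intro k
    induction k with
    | zero =>
      intro r hr
      rw [pvExpand, dif_neg (by omega)]
      exact List.nodup_nil
    | succ k ih =>
      intro r hr
      rw [pvExpand]
      by_cases hg : r ≤ 6 ∧ r ≤ c ∧ c + r ≤ n ∧
          cs.getD (c - r) ' ' = (cs.map pvCompl).getD (c + r - 1) ' '
      · rw [dif_pos hg]
        apply List.Nodup.append
        · by_cases h2r : 2 ≤ r <;> simp [h2r]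
        · exact ih (r + 1) (by omega)
        · intro p hp hp'
          rcases (pvExpand_mem cs n c (r + 1) hn p).mp hp' with ⟨ρ, hρ1, _, _, _, _, _, hρ7⟩
          by_cases h2r : 2 ≤ r
          · simp only [h2r, if_pos, List.mem_singleton] at hp
            rw [hp] at hρ7
            have : (2 * (r : Int)) = 2 * (ρ : Int) := congrArg Prod.snd hρ7
            omega
          · simp [h2r] at hp
      · rw [dif_neg hg]; exact List.nodup_nil
  exact main (7 - r) r (le_refl _)

-- lexicographic ≤ on pairs of integers (the order results.sort() uses)
def pvLexle (a b : Int × Int) : Prop := a.1 < b.1 ∨ (a.1 = b.1 ∧ a.2 ≤ b.2)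

def pvLt2 (a b : Int × Int) : Bool :=
  decide (a.1 < b.1) || (!decide (b.1 < a.1) && decide (a.2 < b.2))

lemma pvLt2_lexle {a b : Int × Int} (h : pvLt2 a b = true) : pvLexle a b := by
  unfold pvLt2 at h; unfold pvLexle; simp at h; omega

lemma pvLt2_false_lexle {a b : Int × Int} (h : ¬ pvLt2 a b = true) : pvLexle b a := by
  unfold pvLt2 at h; unfold pvLexle; simp at h; omega

lemma pvLexle_trans {a b c : Int × Int} (h1 : pvLexle a b) (h2 : pvLexle b c) : pvLexle a c := by
  unfold pvLexle at *; omega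

lemma pvInsert_pairwise (x : Int × Int) (acc : List (Int × Int))
    (h : acc.Pairwise pvLexle) : (PySem.List.insertBy pvLt2 x acc).Pairwise pvLexle := by
  induction acc with
  | nil => simp [PySem.List.insertBy]
  | cons y ys ih =>
    rw [List.pairwise_cons] at h
    by_cases hxy : pvLt2 x y = true
    · simp only [PySem.List.insertBy, hxy, if_pos]
      refine List.Pairwise.cons ?_ (List.Pairwise.cons h.1 h.2)
      intro z hz
      rcases List.mem_cons.mp hz with rfl | hz
      · exact pvLt2_lexle hxy
      · exact pvLexle_trans (pvLt2_lexle hxy) (h.1 z hz)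
    · simp only [PySem.List.insertBy, hxy, if_neg, Bool.false_eq_true, not_false_iff]
      refine List.Pairwise.cons ?_ (ih h.2)
      intro z hz
      rcases (PySem.List.insertBy_mem_iff _ _ _ _).mp hz with rfl | hz
      · exact pvLt2_false_lexle hxy
      · exact h.1 z hz

lemma pvFoldl_insert_pairwise (xs : List (Int × Int)) (acc : List (Int × Int))
    (h : acc.Pairwise pvLexle) :
    (xs.foldl (fun acc x => PySem.List.insertBy pvLt2 x acc) acc).Pairwise pvLexle := by
  induction xs generalizing acc with
  | nil => exact h
  | cons x xs ih => exact ih _ (pvInsert_pairwise x acc h)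

lemma pvSorted2_pairwise (xs : List (Int × Int)) :
    (PySem.List.sorted2 xs Prod.fst Prod.snd).Pairwise pvLexle := by
  have : PySem.List.sorted2 xs Prod.fst Prod.snd =
      xs.foldl (fun acc x => PySem.List.insertBy pvLt2 x acc) [] := rfl
  rw [this]
  exact pvFoldl_insert_pairwise xs [] (by simp)

lemma pvSorted2_congr_perm (xs ys : List (Int × Int)) (h : xs.Perm ys) :
    PySem.List.sorted2 xs Prod.fst Prod.snd = PySem.List.sorted2 ys Prod.fst Prod.snd := by
  apply List.eq_of_perm_of_sorted (le := pvLexle)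
  · rintro ⟨a1, a2⟩ ⟨b1, b2⟩ _ _ h1 h2
    unfold pvLexle at h1 h2
    have : a1 = b1 ∧ a2 = b2 := by constructor <;> omega
    simp [this.1, this.2]
  · exact pvSorted2_pairwise xs
  · exact pvSorted2_pairwise ys
  · exact ((PySem.List.sorted2_perm xs _ _ _).trans h).trans
      (PySem.List.sorted2_perm ys _ _ _).symm

-- the whole equivalence, stated over the cleaned character list
lemma pvMain (cs : List Char) (hpre : cs.length < 4 ∨ ∀ c ∈ cs, pvGood c) :
    PySem.List.sorted2
      ((PySem.List.pyRange 4 13 1).foldl (fun acc length =>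
        (PySem.List.pyRange 0 ((PySem.List.len cs) - length + 1) 1).foldl (fun acc start =>
          if reverse_complement (PySem.List.slice cs (some start) (some (start + length))) =
              some (PySem.List.slice cs (some start) (some (start + length))) then
            acc ++ [(start + 1, length)] else acc) acc) []) Prod.fst Prod.snd =
    PySem.List.sorted2
      (if 4 ≤ cs.length then
        (List.range' 1 (cs.length - 1)).foldl
          (fun acc c => acc ++ pvExpand cs (cs.map pvCompl) cs.length c 1) []
      else []) Prod.fst Prod.snd := by
  simp only [PySem.List.foldl_append_ite, PySem.List.foldl_append_eq_flatMap,
    List.nil_append, PySem.List.len_eq]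
  by_cases h4 : 4 ≤ cs.length
  · have hval : ∀ c ∈ cs, pvGood c := hpre.resolve_left (by omega)
    rw [if_pos h4]
    apply pvSorted2_congr_perm
    refine (List.perm_ext_iff_of_nodup ?_ ?_).mpr ?_
    · -- A's pre-sort list has no duplicates
      rw [List.nodup_flatMap]
      constructor
      · intro L hL
        refine List.Nodup.map ?_ (List.Nodup.filter _ (PySem.List.nodup_pyRange_one 0 _))
        intro a b hab
        simpa using hab
      · refine List.Pairwise.imp ?_ (PySem.List.pairwise_lt_pyRange_one 4 13)
        intro L L' hLL' p hp hp'
        simp only [List.mem_map] at hp hp'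
        obtain ⟨a, _, ha⟩ := hp
        obtain ⟨b, _, hb⟩ := hp'
        rw [← ha] at hb
        have := (Prod.mk.injEq _ _ _ _).mp hb
        omega
    · -- B's pre-sort list has no duplicates
      rw [List.nodup_flatMap]
      constructor
      · intro c hc
        exact pvExpand_nodup cs cs.length c 1 rfl
      · refine List.Pairwise.imp ?_ (List.pairwise_lt_range' 1) 
        intro c c' hcc' p hp hp'
        rcases (pvExpand_mem cs cs.length c 1 rfl p).mp hp with
          ⟨ρ, _, _, _, _, _, _, hρ7⟩
        rcases (pvExpand_mem cs cs.length c' 1 rfl p).mp hp' with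
          ⟨ρ', _, _, _, _, _, _, hρ7'⟩
        rw [hρ7] at hρ7'
        have := (Prod.mk.injEq _ _ _ _).mp hρ7'
        omega
    · -- same members
      intro p
      simp only [List.mem_flatMap, List.mem_map, List.mem_filter,
        PySem.List.mem_pyRange_one, List.mem_range'_1, decide_eq_true_eq,
        pvExpand_mem cs cs.length _ 1 rfl]
      constructor
      · rintro ⟨L, ⟨hL4, hL13⟩, s, ⟨⟨hs0, hslt⟩, hcond⟩, hp⟩
        have hsl : s.toNat + L.toNat ≤ cs.length := by omega
        rw [PySem.List.slice_toNat cs (by omega) (by omega),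
          show (s + L).toNat - s.toNat = L.toNat by omega] at hcond
        have hulen : ((cs.drop s.toNat).take L.toNat).length = L.toNat := by
          simp only [List.length_take, List.length_drop]; omega
        have huval : ∀ c' ∈ (cs.drop s.toNat).take L.toNat, pvGood c' :=
          fun c' hc' => hval c' (List.mem_of_mem_drop (List.mem_of_mem_take hc'))
        rcases Nat.even_or_odd L.toNat with ⟨ρ, hρ⟩ | ⟨m, hm⟩
        · rw [show L.toNat = 2 * ρ by omega] at hcond
          rw [pvRC_even cs hval s.toNat ρ (by omega) (by omega)] at hcond
          refine ⟨s.toNat + ρ, ⟨by omega, by omega⟩, ρ, by omega, by omega, by omega,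
            by omega, by omega, hcond, ?_⟩
          rw [← hp, Prod.mk.injEq]
          constructor <;> push_cast <;> omega
        · exfalso
          exact pvRC_odd _ huval (by omega) hcond
      · rintro ⟨c, ⟨hc1, hc2⟩, ρ, h1ρ, h2ρ, h6ρ, hρc, hcn, hpm, hp⟩
        refine ⟨((2 * ρ : Nat) : Int), ⟨by omega, by omega⟩,
          ((c - ρ : Nat) : Int), ⟨⟨by omega, by omega⟩, ?_⟩, ?_⟩
        · rw [PySem.List.slice_toNat cs (by omega) (by omega),
            show (((c - ρ : Nat) : Int) + ((2 * ρ : Nat) : Int)).toNat -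
              ((c - ρ : Nat) : Int).toNat = 2 * ρ by omega,
            show ((c - ρ : Nat) : Int).toNat = c - ρ by omega]
          rw [pvRC_even cs hval (c - ρ) ρ (by omega) (by omega),
            show c - ρ + ρ = c by omega]
          exact hpm
        · rw [hp, Prod.mk.injEq]
          constructor <;> push_cast <;> omega
  · rw [if_neg h4]
    congr 1
    rw [List.flatMap_eq_nil_iff]
    intro L hL
    rw [PySem.List.mem_pyRange_one] at hL
    rw [PySem.List.pyRange_one_eq_nil (by omega)]
    simp

-- ===== VERDICT (by name: the statement is the Claim_ definition above) =====
theorem find_reverse_palindromes_spec : Claim_equal_find_reverse_palindromes := by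
  intro dna _ hpre
  unfold Spec_find_reverse_palindromes find_reverse_palindromes find_reverse_palindromes_alt
  refine pvMain _ ?_
  unfold Pre_find_reverse_palindromes at hpre
  rcases hpre with h | h
  · exact Or.inl h
  · refine Or.inr ?_
    intro c hc
    have := List.all_eq_true.mp h c hc
    unfold pvGood
    simp only [Bool.or_eq_true, beq_iff_eq] at this
    clear hc h
    tauto
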